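-- pv_equiv track=rewrite | github.com/jifrozen0110/jungle_algo | 채동현/27.py | get_num_set
-- ===== SOURCE A (Python) =====
-- def get_num_set(cards, k, selected, result):
--     if len(selected) == k:
--         number = int(''.join(map(str, selected)))
--         result.add(number)
--         return
--
--     for i in range(len(cards)):
--         get_num_set(cards[:i] + cards[i+1:], k, selected + [cards[i]], result)
--     return result
-- ===== SOURCE B (Python) =====
-- def get_num_set(cards, k, selected, result):
--     # Iterative level-by-level (BFS) permutation builder instead of DFS recursion;
--     # builds the digit string incrementally per level.
--     r = k - len(selected)
--     if r < 0 or r > len(cards):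
--         return result
--     prefix = ''.join(map(str, selected))
--     level = [(prefix, cards)]
--     for _ in range(r):
--         nxt = []
--         for s, rem in level:
--             for i in range(len(rem)):
--                 nxt.append((s + str(rem[i]), rem[:i] + rem[i+1:]))
--         level = nxt
--     for s, _ in level:
--         result.add(int(s))
--     return result
-- ===== Notes on version B (the rewrite author's own statement) =====
-- stated objective: alternative
-- what changed: Replaces A's DFS recursion (which re-slices the card list and rebuilds the chosen prefix on every call) with an iterative breadth-first frontier of (digit-string, remaining-cards) pairs that is expanded level by level and flushed into the set at the end.
-- outside the precondition, e.g. on get_num_set([1], 1, [5], set()): A returns None, B returns {5}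
import Mathlib
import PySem

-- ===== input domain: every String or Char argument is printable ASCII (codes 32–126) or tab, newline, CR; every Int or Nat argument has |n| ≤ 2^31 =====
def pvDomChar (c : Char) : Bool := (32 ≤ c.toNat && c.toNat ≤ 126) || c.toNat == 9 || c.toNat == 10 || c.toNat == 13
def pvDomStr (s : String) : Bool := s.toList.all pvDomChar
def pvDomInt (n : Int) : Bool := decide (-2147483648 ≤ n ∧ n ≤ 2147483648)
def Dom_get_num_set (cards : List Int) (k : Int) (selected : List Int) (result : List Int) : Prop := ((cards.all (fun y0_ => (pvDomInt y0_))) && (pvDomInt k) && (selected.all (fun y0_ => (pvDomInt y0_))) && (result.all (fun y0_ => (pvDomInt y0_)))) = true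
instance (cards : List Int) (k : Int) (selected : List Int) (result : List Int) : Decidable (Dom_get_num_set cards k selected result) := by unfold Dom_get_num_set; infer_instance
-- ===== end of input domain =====

-- B replaces A's DFS recursion (re-slicing the card list per call) by an iterative
-- level-by-level (BFS) frontier that grows the digit string one card at a time;
-- objective: alternative decomposition (similar cost). Both Pythons mutate `result`
-- in the same way (same elements added in the same order), so return-value
-- equivalence here also covers the observable mutation on the admitted inputs.

-- shared helper: `result.add(int(s))`, with `none` exactly where Python's int() raises
-- ValueError (such inputs lie outside Pre_get_num_set)
def pvAddNum (res : List Int) (s : String) : List Int :=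
  match PySem.Int.ofStr? s with
  | some n => PySem.Set.add res n
  | none => res

-- cards[:i] + cards[i+1:] for a Nat index is take/drop (used by the ports' termination)
theorem pvSliceSplit (xs : List Int) (i : Nat) :
    PySem.List.slice xs none (some (i : Int)) ++ PySem.List.slice xs (some ((i : Int) + 1)) none
      = xs.take i ++ xs.drop (i + 1) := by
  have h : ((i : Int) + 1) = ((i + 1 : Nat) : Int) := by push_cast; ring
  rw [h, PySem.List.slice_to_natCast, PySem.List.slice_from_natCast]

-- ===== PORT A =====
-- literal port of A's DFS recursion; in the base case Python computes int(join),
-- adds it to the mutated set and returns None — the updated set is returned here,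
-- which matches the caller-visible state (the top-level len(selected)==k case is
-- outside Pre_get_num_set).
def get_num_set (cards : List Int) (k : Int) (selected : List Int) (result : List Int) : List Int :=
  if (selected.length : Int) = k then
    pvAddNum result (PySem.Str.join "" (selected.map PySem.Int.toStr))
  else
    (List.range cards.length).attach.foldl
      (fun res i =>
        get_num_set
          (PySem.List.slice cards none (some (i.1 : Int)) ++
            PySem.List.slice cards (some ((i.1 : Int) + 1)) none)
          k (selected ++ [PySem.List.pyGetD cards (i.1 : Int) 0]) res)
      result
  termination_by cards.length
  decreasing_by
    have hi : i.1 < cards.length := by have := i.2; simpa using this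
    rw [pvSliceSplit]
    simp only [List.length_append, List.length_take, List.length_drop]
    omega

-- ===== PORT B =====
-- one BFS expansion step: every (digit-string, remaining-cards) pair of the frontier
-- spawns one child per remaining card (Source B's inner double loop building nxt)
def pvExpand (lvl : List (String × List Int)) : List (String × List Int) :=
  lvl.flatMap (fun p =>
    (List.range p.2.length).map (fun (i : Nat) =>
      (p.1 ++ PySem.Int.toStr (PySem.List.pyGetD p.2 (i : Int) 0),
       PySem.List.slice p.2 none (some (i : Int)) ++
         PySem.List.slice p.2 (some ((i : Int) + 1)) none)))

def get_num_set_alt (cards : List Int) (k : Int) (selected : List Int) (result : List Int) : List Int :=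
  let r := k - (selected.length : Int)
  if r < 0 ∨ (cards.length : Int) < r then result
  else
    let pre := PySem.Str.join "" (selected.map PySem.Int.toStr)
    let level := (List.range r.toNat).foldl (fun lvl _ => pvExpand lvl) [(pre, cards)]
    level.foldl (fun res p => pvAddNum res p.1) result

-- ===== PRECONDITION & SPEC =====
-- Pre_ excludes (a) k == len(selected), where A returns None (not a set value) after
-- raising ValueError on int('') when selected is empty, and (b) inputs whose reached
-- digit strings contain an interior '-' (a negative card, or a negative in selected
-- past the head, when permutations of length k-len(selected) are actually formed),
-- where A raises ValueError.
def Pre_get_num_set (cards : List Int) (k : Int) (selected : List Int) (result : List Int) : Prop :=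
  (selected.length : Int) ≠ k ∧
  (((selected.length : Int) < k ∧ k ≤ (selected.length : Int) + (cards.length : Int)) →
    (((∀ x ∈ cards, 0 ≤ x) ∧ (∀ x ∈ selected.drop 1, 0 ≤ x)) ∨ (selected = [] ∧ k = 1)))
instance (cards : List Int) (k : Int) (selected : List Int) (result : List Int) : Decidable (Pre_get_num_set cards k selected result) := by unfold Pre_get_num_set; infer_instance

def pvWitness_get_num_set : List Int × Int × List Int × List Int := ([1, 2], 2, [], [])

def Spec_get_num_set (cards : List Int) (k : Int) (selected : List Int) (result : List Int) (out : List Int) : Prop := out = get_num_set_alt cards k selected result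
instance (cards : List Int) (k : Int) (selected : List Int) (result : List Int) (out : List Int) : Decidable (Spec_get_num_set cards k selected result out) := by unfold Spec_get_num_set; infer_instance

-- ===== CLAIM (what is proved, stated in full; the proofs are below) =====
def Claim_equal_get_num_set : Prop := ∀ (cards : List Int) (k : Int) (selected : List Int) (result : List Int), Dom_get_num_set cards k selected result → Pre_get_num_set cards k selected result → Spec_get_num_set cards k selected result (get_num_set cards k selected result)

-- ===== LEMMAS AND PROOFS =====

-- the digit string of a list of ints, on the List Char side
def pvJoinL (xs : List Int) : List Char :=
  PySem.Chars.join [] (xs.map (fun x => (PySem.Int.toStr x).toList))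

-- pvAddNum on the List Char side
def pvStep (res : List Int) (cs : List Char) : List Int :=
  match PySem.Int.ofChars? cs with
  | some n => PySem.Set.add res n
  | none => res

-- the k-permutation index sequences of cards, in A's DFS order (= B's last BFS level order)
def pvSeqs : Nat → List Int → List (List Int)
  | 0, _ => [[]]
  | n + 1, cards =>
      (List.range cards.length).flatMap
        (fun i => (pvSeqs n (cards.take i ++ cards.drop (i + 1))).map
          (fun q => cards.getD i 0 :: q))

theorem pvAddNum_toList (res : List Int) (s : String) :
    pvAddNum res s = pvStep res s.toList := rfl

theorem pvJoin_nil (l : List (List Char)) : PySem.Chars.join [] l = l.flatten := by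
  induction l with
  | nil => rfl
  | cons a t ih =>
      cases t with
      | nil => simp [PySem.Chars.join, List.intercalate]
      | cons b t' =>
          simp only [PySem.Chars.join, List.intercalate] at ih ⊢
          simp [List.intersperse, List.flatten] at ih ⊢
          exact ih

theorem pvJoinL_append (xs ys : List Int) :
    pvJoinL (xs ++ ys) = pvJoinL xs ++ pvJoinL ys := by
  simp [pvJoinL, pvJoin_nil]

theorem pvJoin_toList (xs : List Int) :
    (PySem.Str.join "" (xs.map PySem.Int.toStr)).toList = pvJoinL xs := by
  simp [pvJoinL, PySem.Str.toList_join, List.map_map, Function.comp_def, PySem.Int.toList_toStr]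

theorem pvJoinL_cons (x : Int) (q : List Int) :
    pvJoinL (x :: q) = (PySem.Int.toStr x).toList ++ pvJoinL q := by
  simp [pvJoinL, pvJoin_nil]

theorem pvSeqs_nil_of_lt (n : Nat) : ∀ cards : List Int, cards.length < n → pvSeqs n cards = [] := by
  induction n with
  | zero => intro cards h; omega
  | succ n ih =>
      intro cards h
      simp only [pvSeqs, List.flatMap_eq_nil_iff]
      intro i hi
      simp only [List.mem_range] at hi
      rw [ih _ (by simp only [List.length_append, List.length_take, List.length_drop]; omega)]
      simp

theorem pv_foldl_id {α β : Type} (l : List α) (f : β → α → β) (init : β)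
    (h : ∀ b, ∀ x ∈ l, f b x = b) : l.foldl f init = init := by
  induction l generalizing init with
  | nil => rfl
  | cons a t ih =>
      rw [List.foldl_cons, h init a (by simp)]
      exact ih init (fun b x hx => h b x (by simp [hx]))

theorem pvJoinL_nil : pvJoinL [] = [] := rfl

-- A's recursive case, with attach/slice/pyGetD removed
theorem pv_A_unfold (cards : List Int) (k : Int) (selected result : List Int)
    (hk : (selected.length : Int) ≠ k) :
    get_num_set cards k selected result =
      (List.range cards.length).foldl
        (fun res i => get_num_set (cards.take i ++ cards.drop (i + 1)) k
          (selected ++ [cards.getD i 0]) res) result := by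
  rw [get_num_set, if_neg hk,
    ← List.foldl_attach (l := List.range cards.length)
      (f := fun res i => get_num_set (cards.take i ++ cards.drop (i + 1)) k
        (selected ++ [cards.getD i 0]) res) (b := result)]
  refine PySem.List.foldl_congr_mem _ _ _ _ ?_
  intro res i _
  simp only [pvSliceSplit, PySem.List.pyGetD_natCast]

-- characterisation of A: DFS collects exactly the pvSeqs suffixes, in order
theorem pv_A_char : ∀ (N : Nat) (cards : List Int), cards.length ≤ N →
    ∀ (k : Int) (selected result : List Int),
    get_num_set cards k selected result =
      if (selected.length : Int) ≤ k then
        (pvSeqs (k - selected.length).toNat cards).foldl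
          (fun res q => pvStep res (pvJoinL (selected ++ q))) result
      else result := by
  intro N
  induction N with
  | zero =>
      intro cards hlen k selected result
      have hc : cards = [] := by cases cards <;> simp_all
      subst hc
      by_cases hk : (selected.length : Int) = k
      · rw [get_num_set, if_pos hk, if_pos (le_of_eq hk)]
        have h0 : (k - (selected.length : Int)).toNat = 0 := by omega
        rw [h0]
        simp only [pvSeqs, List.foldl_cons, List.foldl_nil, List.append_nil]
        rw [pvAddNum_toList, pvJoin_toList]
      · rw [pv_A_unfold _ _ _ _ hk]
        by_cases hle : (selected.length : Int) ≤ k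
        · have h1 : 0 < (k - (selected.length : Int)).toNat := by omega
          rw [pvSeqs_nil_of_lt _ [] (by simpa using h1)]
          simp [hle]
        · simp [hle]
  | succ N ih =>
      intro cards hlen k selected result
      by_cases hk : (selected.length : Int) = k
      · rw [get_num_set, if_pos hk, if_pos (le_of_eq hk)]
        have h0 : (k - (selected.length : Int)).toNat = 0 := by omega
        rw [h0]
        simp only [pvSeqs, List.foldl_cons, List.foldl_nil, List.append_nil]
        rw [pvAddNum_toList, pvJoin_toList]
      · rw [pv_A_unfold _ _ _ _ hk]
        by_cases hle : (selected.length : Int) ≤ k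
        · -- strictly below k: one card is chosen at each position
          have hm : (k - (selected.length : Int)).toNat
              = (k - ((selected.length : Int) + 1)).toNat + 1 := by omega
          rw [if_pos hle, hm]
          simp only [pvSeqs]
          rw [List.foldl_flatMap]
          refine PySem.List.foldl_congr_mem _ _ _ _ ?_
          intro res i hi
          simp only [List.mem_range] at hi
          rw [ih _ (by simp only [List.length_append, List.length_take, List.length_drop]; omega)]
          have hle' : (((selected ++ [cards.getD i 0]).length : Int)) ≤ k := by
            simp; omega
          rw [if_pos hle']
          have htn : (k - ((selected ++ [cards.getD i 0]).length : Int)).toNat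
              = (k - ((selected.length : Int) + 1)).toNat := by simp
          rw [htn, List.foldl_map]
          refine PySem.List.foldl_congr_mem _ _ _ _ ?_
          intro r q _
          have hq : (selected ++ [cards.getD i 0]) ++ q = selected ++ cards.getD i 0 :: q := by
            simp
          rw [hq]
        · -- selected is already longer than k: nothing is ever added
          rw [if_neg hle]
          refine pv_foldl_id _ _ _ ?_
          intro res i hi
          simp only [List.mem_range] at hi
          rw [ih _ (by simp only [List.length_append, List.length_take, List.length_drop]; omega)]
          rw [if_neg (by simp; omega)]

-- characterisation of B's frontier fold
theorem pv_levelNum : ∀ (n : Nat) (lvl : List (String × List Int)) (result : List Int),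
    ((List.range n).foldl (fun l _ => pvExpand l) lvl).foldl
        (fun res p => pvStep res p.1.toList) result
      = lvl.foldl
          (fun res p => (pvSeqs n p.2).foldl
            (fun r q => pvStep r (p.1.toList ++ pvJoinL q)) res) result := by
  intro n
  induction n with
  | zero =>
      intro lvl result
      simp only [List.range_zero, List.foldl_nil, pvSeqs, List.foldl_cons, pvJoinL_nil,
        List.append_nil]
  | succ n ih =>
      intro lvl result
      rw [List.range_succ_eq_map]
      simp only [List.foldl_cons, List.foldl_map]
      rw [ih]
      rw [show pvExpand lvl = lvl.flatMap (fun p =>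
            (List.range p.2.length).map (fun (i : Nat) =>
              (p.1 ++ PySem.Int.toStr (PySem.List.pyGetD p.2 (i : Int) 0),
               PySem.List.slice p.2 none (some (i : Int)) ++
                 PySem.List.slice p.2 (some ((i : Int) + 1)) none))) from rfl]
      rw [List.foldl_flatMap]
      refine PySem.List.foldl_congr_mem _ _ _ _ ?_
      intro res p _
      simp only [pvSliceSplit, PySem.List.pyGetD_natCast]
      rw [List.foldl_map]
      simp only [pvSeqs]
      rw [List.foldl_flatMap]
      refine PySem.List.foldl_congr_mem _ _ _ _ ?_
      intro res2 i _
      rw [List.foldl_map]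
      refine PySem.List.foldl_congr_mem _ _ _ _ ?_
      intro r q _
      simp only [String.toList_append, pvJoinL_cons, List.append_assoc]

theorem pv_B_char (cards : List Int) (k : Int) (selected result : List Int) :
    get_num_set_alt cards k selected result =
      if (selected.length : Int) ≤ k ∧ k ≤ (selected.length : Int) + (cards.length : Int) then
        (pvSeqs (k - selected.length).toNat cards).foldl
          (fun res q => pvStep res (pvJoinL (selected ++ q))) result
      else result := by
  unfold get_num_set_alt
  by_cases hc : k - (selected.length : Int) < 0 ∨ (cards.length : Int) < k - (selected.length : Int)
  · rw [if_pos hc, if_neg (by omega)]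
  · rw [if_neg hc, if_pos (by omega)]
    have hstep : (fun (res : List Int) (p : String × List Int) => pvAddNum res p.1)
        = fun res p => pvStep res p.1.toList := rfl
    rw [hstep, pv_levelNum]
    simp only [List.foldl_cons, List.foldl_nil]
    refine PySem.List.foldl_congr_mem _ _ _ _ ?_
    intro res q _
    rw [pvJoin_toList, ← pvJoinL_append]

-- ===== VERDICT (by name: the statement is the Claim_ definition above) =====
theorem get_num_set_spec : Claim_equal_get_num_set := by
  intro cards k selected result _ _
  unfold Spec_get_num_set
  rw [pv_A_char cards.length cards le_rfl, pv_B_char]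
  by_cases h1 : (selected.length : Int) ≤ k
  · by_cases h2 : k ≤ (selected.length : Int) + (cards.length : Int)
    · simp [h1, h2]
    · simp only [h1, h2, and_false, if_true, if_false]
      rw [pvSeqs_nil_of_lt _ cards (by omega)]
      rfl
  · simp [h1]
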